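-- pv_equiv track=rewrite | github.com/alogeclock/Jungle_Week9_Team1 | Scripts/GenerateProjectFiles.py | collect_all_filters
-- ===== SOURCE A (Python) =====
-- def get_filter(rel_path: str) -> str:
--     """Return the filter (directory portion) from a relative path."""
--     parts = rel_path.replace("/", "\\").rsplit("\\", 1)
--     return parts[0] if len(parts) > 1 else ""
--
-- def collect_all_filters(files: dict[str, list[str]]) -> set[str]:
--     """Collect all unique filter paths including parent paths."""
--     filters = set()
--     for file_list in files.values():
--         for f in file_list:
--             filt = get_filter(f)
--             if filt:
--                 parts = filt.split("\\")
--                 for i in range(1, len(parts) + 1):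
--                     filters.add("\\".join(parts[:i]))
--     return filters
-- ===== SOURCE B (Python) =====
-- def collect_all_filters(files: dict[str, list[str]]) -> set[str]:
--     """Collect all unique filter paths including parent paths.
--
--     The directory portion is taken with rpartition, and the parent prefixes are
--     produced by a single left-to-right character scan that emits the running
--     prefix at every backslash (and the whole directory at the end), instead of
--     splitting into parts and re-joining each slice parts[:i]."""
--     filters = set()
--     for file_list in files.values():
--         for f in file_list:
--             head = f.replace("/", "\\").rpartition("\\")[0]
--             if head:
--                 cur = ""
--                 for ch in head:
--                     if ch == "\\":
--                         filters.add(cur)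
--                     cur += ch
--                 filters.add(cur)
--     return filters
-- ===== Notes on version B (the rewrite author's own statement) =====
-- stated objective: simpler
-- what changed: The prefix enumeration per filter is a single left-to-right character scan that emits the running prefix at each backslash (and the whole filter at the end), replacing A's split into parts plus an indexed loop re-joining each slice parts[:i].
import Mathlib
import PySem

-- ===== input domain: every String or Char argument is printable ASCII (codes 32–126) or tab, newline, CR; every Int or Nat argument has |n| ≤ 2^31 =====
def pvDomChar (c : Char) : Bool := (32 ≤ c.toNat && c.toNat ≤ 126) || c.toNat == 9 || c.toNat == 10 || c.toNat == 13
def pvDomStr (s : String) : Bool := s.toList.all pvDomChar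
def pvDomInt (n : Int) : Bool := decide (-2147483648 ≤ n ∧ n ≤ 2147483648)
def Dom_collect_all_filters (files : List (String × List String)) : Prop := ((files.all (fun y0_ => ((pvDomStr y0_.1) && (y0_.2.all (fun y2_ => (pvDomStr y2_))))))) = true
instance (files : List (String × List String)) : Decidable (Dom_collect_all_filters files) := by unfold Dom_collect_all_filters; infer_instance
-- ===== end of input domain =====

-- B replaces A's split-into-parts plus re-joined slices parts[:i] by a single character
-- scan emitting the running prefix at each backslash (objective: simpler; return value only).
-- ===== PORT A =====
-- hand port of str.rsplit(sep, 1) for the single-character separator "\\" (PySem has no rsplit):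
-- split at the LAST occurrence; one part if the separator is absent — exact for this sep
def rsplit1 (cs : List Char) : List (List Char) :=
  match cs.reverse.span (· ≠ '\\') with
  | (_, []) => [cs]
  | (tl, _ :: front) => [front.reverse, tl.reverse]

def get_filter (rel_path : String) : String :=
  let parts := rsplit1 (PySem.Chars.replace rel_path.toList ['/'] ['\\'])
  if PySem.List.len parts > 1 then String.ofList (PySem.List.pyGetD parts 0 []) else ""

def collect_all_filters (files : List (String × List String)) : List String :=
  files.foldl (fun filters kv =>
    kv.2.foldl (fun filters f =>
      let filt := get_filter f
      if filt ≠ "" then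
        let parts := PySem.Chars.splitOn filt.toList ['\\']
        (PySem.List.pyRange 1 ((parts.length : Int) + 1) 1).foldl (fun filters i =>
          PySem.Set.add filters
            (String.ofList (PySem.Chars.join ['\\'] (PySem.List.slice parts none (some i))))) filters
      else filters) filters) PySem.Set.empty

-- ===== PORT B =====
-- hand port of str.rpartition(sep) for the single-character separator "\\" (PySem has no
-- rpartition): split at the LAST occurrence, ("", "", s) if absent — exact for this sep
def rpartition1 (cs : List Char) : List Char × List Char × List Char :=
  match cs.reverse.span (· ≠ '\\') with
  | (_, []) => ([], [], cs)
  | (tl, _ :: front) => (front.reverse, ['\\'], tl.reverse)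

-- B: the prefix enumeration is ONE left-to-right character scan with a running prefix
-- (cur kept as List Char, added as a String — the PySem string convention)
def collect_all_filters_alt (files : List (String × List String)) : List String :=
  files.foldl (fun filters kv =>
    kv.2.foldl (fun filters f =>
      let filt := String.ofList (rpartition1 (PySem.Chars.replace f.toList ['/'] ['\\'])).1
      if filt ≠ "" then
        let p := filt.toList.foldl (fun (st : PySem.Set String × List Char) ch =>
          (if ch = '\\' then PySem.Set.add st.1 (String.ofList st.2) else st.1, st.2 ++ [ch]))
          (filters, [])
        PySem.Set.add p.1 (String.ofList p.2)
      else filters) filters) PySem.Set.empty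

-- ===== PRECONDITION & SPEC =====
def Spec_collect_all_filters (files : List (String × List String)) (out : List String) : Prop := out = collect_all_filters_alt files
instance (files : List (String × List String)) (out : List String) : Decidable (Spec_collect_all_filters files out) := by unfold Spec_collect_all_filters; infer_instance

-- ===== CLAIM (what is proved, stated in full; the proofs are below) =====
def Claim_equal_collect_all_filters : Prop := ∀ (files : List (String × List String)), Dom_collect_all_filters files → Spec_collect_all_filters files (collect_all_filters files)

-- ===== LEMMAS AND PROOFS =====

-- result of splitOn with the head piece extended at the front by p
def consHead (p : List Char) : List (List Char) → List (List Char)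
  | [] => [p]
  | x :: xs => (p ++ x) :: xs

-- B's scan loop as a structural recursion (state: set, running prefix)
def bloop : List Char → PySem.Set String → List Char → PySem.Set String
  | [], s, cur => PySem.Set.add s (String.ofList cur)
  | c :: cs, s, cur => bloop cs (if c = '\\' then PySem.Set.add s (String.ofList cur) else s) (cur ++ [c])

-- A's loop over the split parts, re-expressed as a recursion on the parts
def aj : List (List Char) → PySem.Set String → List Char → PySem.Set String
  | [], s, _ => s
  | p :: rest, s, cur => aj rest (PySem.Set.add s (String.ofList (cur ++ p))) (cur ++ p ++ ['\\'])

theorem go_ne_nil (fuel : Nat) (l cur : List Char) (acc : List (List Char)) :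
    PySem.Chars.splitOn.go ['\\'] fuel l cur acc ≠ [] := by
  induction fuel generalizing l cur acc with
  | zero => simp [PySem.Chars.splitOn.go]
  | succ fuel ih =>
    cases l with
    | nil => simp [PySem.Chars.splitOn.go]
    | cons c rest =>
      simp only [PySem.Chars.splitOn.go]
      split
      · exact ih _ _ _
      · exact ih _ _ _

theorem consHead_nil {g : List (List Char)} (h : g ≠ []) : consHead [] g = g := by
  cases g with
  | nil => exact absurd rfl h
  | cons x xs => simp [consHead]

theorem go_acc (fuel : Nat) (l cur : List Char) (acc : List (List Char)) :
    PySem.Chars.splitOn.go ['\\'] fuel l cur acc =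
      acc.reverse ++ consHead cur.reverse (PySem.Chars.splitOn.go ['\\'] fuel l [] []) := by
  induction fuel generalizing l cur acc with
  | zero => simp [PySem.Chars.splitOn.go, consHead]
  | succ fuel ih =>
    cases l with
    | nil => simp [PySem.Chars.splitOn.go, consHead]
    | cons c rest =>
      simp only [PySem.Chars.splitOn.go]
      by_cases hc : '\\' = c
      · subst hc
        simp only [List.isPrefixOf, BEq.rfl, Bool.true_and, if_pos,
          List.length_cons, List.length_nil, List.drop_succ_cons, List.drop_zero]
        rw [ih rest [] (cur.reverse :: acc), ih rest [] ([].reverse :: [])]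
        simp only [List.reverse_nil, List.reverse_singleton]
        rw [consHead_nil (go_ne_nil _ _ _ _)]
        simp [consHead]
      · have hpre : List.isPrefixOf ['\\'] (c :: rest) = false := by
          simp [List.isPrefixOf]; exact fun h => hc h
        simp only [hpre, Bool.false_eq_true, if_false]
        rw [ih rest (c :: cur) acc, ih rest [c] []]
        simp only [List.reverse_nil, List.reverse_cons]
        cases hg : PySem.Chars.splitOn.go ['\\'] fuel rest [] [] with
        | nil => exact absurd hg (go_ne_nil _ _ _ _)
        | cons x xs => simp [consHead]

theorem splitOn_nil : PySem.Chars.splitOn [] ['\\'] = [[]] := rfl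

theorem splitOn_ne_nil (cs : List Char) : PySem.Chars.splitOn cs ['\\'] ≠ [] := by
  unfold PySem.Chars.splitOn; exact go_ne_nil _ _ _ _

theorem splitOn_cons_sep (cs : List Char) :
    PySem.Chars.splitOn ('\\' :: cs) ['\\'] = [] :: PySem.Chars.splitOn cs ['\\'] := by
  unfold PySem.Chars.splitOn
  simp only [List.length_cons]
  rw [show cs.length + 1 + 1 = (cs.length + 1) + 1 from rfl]
  simp only [PySem.Chars.splitOn.go, List.isPrefixOf, BEq.rfl, Bool.true_and, if_pos,
    List.length_cons, List.length_nil, List.drop_succ_cons, List.drop_zero]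
  rw [go_acc _ _ _ _]
  simp only [List.reverse_nil, List.reverse_singleton]
  rw [consHead_nil (go_ne_nil _ _ _ _)]
  simp

theorem splitOn_cons (c : Char) (cs : List Char) (hc : c ≠ '\\') :
    PySem.Chars.splitOn (c :: cs) ['\\'] = consHead [c] (PySem.Chars.splitOn cs ['\\']) := by
  unfold PySem.Chars.splitOn
  simp only [List.length_cons]
  rw [show cs.length + 1 + 1 = (cs.length + 1) + 1 from rfl]
  have hpre : List.isPrefixOf ['\\'] (c :: cs) = false := by
    simp [List.isPrefixOf]; exact fun h => absurd h.symm hc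
  simp only [PySem.Chars.splitOn.go, hpre, Bool.false_eq_true, if_false]
  rw [go_acc _ _ _ _]
  simp

theorem core (cs : List Char) (s : PySem.Set String) (cur : List Char) :
    bloop cs s cur = aj (PySem.Chars.splitOn cs ['\\']) s cur := by
  induction cs generalizing s cur with
  | nil => simp [splitOn_nil, bloop, aj]
  | cons c cs ih =>
    by_cases hc : c = '\\'
    · subst hc
      rw [splitOn_cons_sep]
      simp only [bloop, if_pos, aj, List.append_nil]
      exact ih _ _
    · rw [splitOn_cons c cs hc]
      simp only [bloop, if_neg hc]
      rw [ih]
      cases hg : PySem.Chars.splitOn cs ['\\'] with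
      | nil => exact absurd hg (splitOn_ne_nil cs)
      | cons p rest => simp [consHead, aj, List.append_assoc]

theorem pyRange_one_map (n : Nat) :
    PySem.List.pyRange 1 ((n : Int) + 1) 1 = (List.range n).map (fun (k : Nat) => (k : Int) + 1) := by
  induction n with
  | zero => decide
  | succ n ih =>
    rw [show ((n + 1 : Nat) : Int) + 1 = ((n : Int) + 1) + 1 by push_cast; ring]
    rw [PySem.List.pyRange_one_succ_right (by omega), ih, List.range_succ]
    simp

theorem ajr (p : List Char) (rest : List (List Char)) (cur : List Char) (s : PySem.Set String) :
    (List.range (p :: rest).length).foldl (fun s k =>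
        PySem.Set.add s (String.ofList (cur ++ PySem.Chars.join ['\\'] ((p :: rest).take (k + 1))))) s
      = aj (p :: rest) s cur := by
  induction rest generalizing p cur s with
  | nil => simp [List.range_succ, PySem.Chars.join_singleton, aj]
  | cons q rest ih =>
    rw [show (p :: q :: rest).length = (q :: rest).length + 1 from rfl, List.range_succ_eq_map]
    rw [List.foldl_cons, List.foldl_map]
    rw [List.foldl_ext _ (fun (s : PySem.Set String) (k : Nat) =>
          PySem.Set.add s (String.ofList ((cur ++ p ++ ['\\']) ++ PySem.Chars.join ['\\'] ((q :: rest).take (k + 1)))))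
        _ (fun s' k _ => by
          rw [List.take_succ_cons, List.take_succ_cons, PySem.Chars.join_cons_cons]
          simp [List.append_assoc])]
    rw [ih q (cur ++ p ++ ['\\'])]
    simp [aj, PySem.Chars.join_singleton, List.append_assoc]

theorem bloop_eq (cs : List Char) (s : PySem.Set String) (cur : List Char) :
    PySem.Set.add (cs.foldl (fun (st : PySem.Set String × List Char) ch =>
        (if ch = '\\' then PySem.Set.add st.1 (String.ofList st.2) else st.1, st.2 ++ [ch])) (s, cur)).1
      (String.ofList (cs.foldl (fun (st : PySem.Set String × List Char) ch =>
        (if ch = '\\' then PySem.Set.add st.1 (String.ofList st.2) else st.1, st.2 ++ [ch])) (s, cur)).2)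
      = bloop cs s cur := by
  induction cs generalizing s cur with
  | nil => simp [bloop]
  | cons c cs ih => simp only [List.foldl_cons, bloop]; exact ih _ _

theorem foldl_pyRange_one {β : Type} (F : β → Int → β) (s : β) (n : Nat) :
    (PySem.List.pyRange 1 ((n : Int) + 1) 1).foldl F s
      = (List.range n).foldl (fun (s : β) (k : Nat) => F s ((k : Int) + 1)) s := by
  rw [pyRange_one_map, List.foldl_map]

theorem inner_eq (filt : String) (s : PySem.Set String) :
    (PySem.List.pyRange 1 (((PySem.Chars.splitOn filt.toList ['\\']).length : Int) + 1) 1).foldl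
        (fun filters i => PySem.Set.add filters
          (String.ofList (PySem.Chars.join ['\\'] (PySem.List.slice (PySem.Chars.splitOn filt.toList ['\\']) none (some i))))) s
      = bloop filt.toList s [] := by
  rw [core]
  cases hg : PySem.Chars.splitOn filt.toList ['\\'] with
  | nil => exact absurd hg (splitOn_ne_nil _)
  | cons p rest =>
    rw [foldl_pyRange_one, ← ajr p rest [] s]
    apply PySem.List.foldl_congr_mem
    intro s' k _
    rw [PySem.List.slice_to _ (by omega)]
    have hk : ((k : Int) + 1).toNat = k + 1 := by omega
    rw [hk]
    simp

theorem inner2_eq (s : PySem.Set String) (f : String) :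
    (if get_filter f ≠ "" then
        (PySem.List.pyRange 1 (((PySem.Chars.splitOn (get_filter f).toList ['\\']).length : Int) + 1) 1).foldl
          (fun filters i => PySem.Set.add filters
            (String.ofList (PySem.Chars.join ['\\'] (PySem.List.slice (PySem.Chars.splitOn (get_filter f).toList ['\\']) none (some i))))) s
      else s)
    = (if get_filter f ≠ "" then
        PySem.Set.add ((get_filter f).toList.foldl (fun (st : PySem.Set String × List Char) ch =>
            (if ch = '\\' then PySem.Set.add st.1 (String.ofList st.2) else st.1, st.2 ++ [ch])) (s, [])).1
          (String.ofList ((get_filter f).toList.foldl (fun (st : PySem.Set String × List Char) ch =>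
            (if ch = '\\' then PySem.Set.add st.1 (String.ofList st.2) else st.1, st.2 ++ [ch])) (s, [])).2)
      else s) := by
  by_cases h : get_filter f ≠ ""
  · rw [if_pos h, if_pos h, inner_eq, ← bloop_eq]
  · rw [if_neg h, if_neg h]

-- A's get_filter computes exactly the first component of B's rpartition
theorem get_filter_eq (f : String) :
    get_filter f = String.ofList (rpartition1 (PySem.Chars.replace f.toList ['/'] ['\\'])).1 := by
  unfold get_filter rsplit1 rpartition1
  rcases hsp : (PySem.Chars.replace f.toList ['/'] ['\\']).reverse.span (· ≠ '\\') with ⟨tl, rest⟩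
  cases rest with
  | nil => simp [PySem.List.len]
  | cons c front => simp [PySem.List.len, PySem.List.pyGetD]

theorem collect_all_filters_spec' (files : List (String × List String)) :
    collect_all_filters files = collect_all_filters_alt files := by
  unfold collect_all_filters collect_all_filters_alt
  apply PySem.List.foldl_congr_mem
  intro acc kv _
  apply PySem.List.foldl_congr_mem
  intro acc2 f _
  rw [← get_filter_eq f]
  exact inner2_eq acc2 f

-- ===== VERDICT (by name: the statement is the Claim_ definition above) =====
theorem collect_all_filters_spec : Claim_equal_collect_all_filters := by
  intro files _
  unfold Spec_collect_all_filters
  exact collect_all_filters_spec' files
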